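-- pv_equiv track=rewrite | github.com/Rilkon/adventofcode | day14/day14.py | part2
-- ===== SOURCE A (Python) =====
-- def rotate_cw(grid):
--     return ["".join(row) for row in zip(*grid[::-1])]
--
-- def tilt_platform(grid):
--     for x, row in enumerate(grid):
--         for _ in range(len(row) - 1):
--             grid[x] = "".join(grid[x]).replace("O.", ".O")
--     return grid
--
-- def spin_cycle(grid):
--     for _ in range(4):
--         grid = tilt_platform(rotate_cw(grid))
--     return grid
--
-- def get_load(grid):
--     return sum([len(grid) - y for y in range(len(grid)) for x in range(len(grid[0])) if grid[y][x] == "O"])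
--
-- def part2(data):
--     grid = data
--     known = {}
--     steps = 0
--     found = False
--     limit = 1_000_000_000
--
--     while steps < limit:
--         steps += 1
--         grid = spin_cycle(grid)
--
--         _key = str(grid)
--         if _key in known and not found:
--             cycle = steps - known[_key]
--             steps += ((limit - steps) // cycle) * cycle
--             found = True
--
--         known[_key] = steps
--
--     return get_load(grid)
-- ===== SOURCE B (Python) =====
-- def _pack_row(row):
--     # one linear pass: within each run of '.'/'O' cells, dots go first, rocks last
--     parts = []
--     dots = 0
--     rocks = 0
--     for ch in row:
--         if ch == '.':
--             dots += 1
--         elif ch == 'O':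
--             rocks += 1
--         else:
--             parts.append('.' * dots + 'O' * rocks + ch)
--             dots = 0
--             rocks = 0
--     parts.append('.' * dots + 'O' * rocks)
--     return ''.join(parts)
--
--
-- def _spin(grid):
--     # four times: rotate clockwise (index form), then roll every rock right in one pass
--     for _ in range(4):
--         m = min(map(len, grid), default=0)
--         grid = [_pack_row(''.join(row[j] for row in reversed(grid))) for j in range(m)]
--     return grid
--
--
-- def _load(grid):
--     n = len(grid)
--     return sum((n - y) * grid[y].count('O') for y in range(n))
--
--
-- def part2(data):
--     limit = 1_000_000_000
--     grid = data
--     seen = {}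
--     steps = 0
--     while steps < limit:
--         steps += 1
--         grid = _spin(grid)
--         key = str(grid)
--         if key in seen:
--             cycle = steps - seen[key]
--             for _ in range((limit - steps) % cycle):
--                 grid = _spin(grid)
--             return _load(grid)
--         seen[key] = steps
--     return _load(grid)
-- ===== Notes on version B (the rewrite author's own statement) =====
-- stated objective: faster
-- what changed: Each tilt pass does one linear sweep per row that packs the 'O's of every '.'/'O'-segment to its far end (and the load is a per-row count), instead of A's len(row)-1 full-string replace('O.','.O') passes per row; the cycle-detection loop exits with the remainder (limit-steps) % cycle of extra spins instead of jumping the step counter and continuing.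
import Mathlib
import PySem

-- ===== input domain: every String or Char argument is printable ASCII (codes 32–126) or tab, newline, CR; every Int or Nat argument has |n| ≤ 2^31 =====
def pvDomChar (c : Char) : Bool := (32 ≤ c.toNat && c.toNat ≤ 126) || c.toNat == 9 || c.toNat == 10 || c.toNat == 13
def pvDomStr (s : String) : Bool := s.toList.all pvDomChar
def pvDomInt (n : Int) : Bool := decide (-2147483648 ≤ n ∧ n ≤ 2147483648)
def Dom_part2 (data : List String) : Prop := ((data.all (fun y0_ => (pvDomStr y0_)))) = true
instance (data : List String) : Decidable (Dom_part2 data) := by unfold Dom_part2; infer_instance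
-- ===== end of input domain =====

-- B replaces A's per-row O(n^2) "repeat replace('O.','.O') n-1 times" tilt by a single
-- linear packing pass per row (and a per-row count-based load); measured faster.
-- Both ports key the cycle dict by the grid itself: Python's str(grid)/str-of-list (A) and
-- str(grid) (B) are injective on lists of printable strings, so the dict mapping is identical.

def pvLimit : Int := 1000000000

-- ===== PORT A =====
-- termination helper for zipAll (cited by name in decreasing_by)
theorem pvZipMeasure :
    ∀ (rows : List (List Char)), ¬(rows = [] ∨ rows.any List.isEmpty = true) →
      ((rows.map List.tail).map List.length).sum < (rows.map List.length).sum := by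
  intro rows h
  have hne : rows ≠ [] := fun he => h (Or.inl he)
  have hemp : rows.any List.isEmpty = false := by
    cases hA : rows.any List.isEmpty
    · rfl
    · exact absurd (Or.inr hA) h
  have key : ∀ (rs : List (List Char)), rs.any List.isEmpty = false →
      ((rs.map List.tail).map List.length).sum + rs.length = (rs.map List.length).sum := by
    intro rs hrs
    induction rs with
    | nil => simp
    | cons r t ih =>
      simp only [List.any_cons, Bool.or_eq_false_iff] at hrs
      have h2 := ih hrs.2
      cases r with
      | nil => simp [List.isEmpty] at hrs
      | cons a b =>
        simp only [List.map_cons, List.sum_cons, List.tail_cons, List.length_cons]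
        omega
  have hk := key rows hemp
  have : rows.length ≠ 0 := by simpa [List.length_eq_zero_iff] using hne
  omega

-- Python zip(*rows): tuples until the shortest iterator is exhausted
def zipAll (rows : List (List Char)) : List (List Char) :=
  if h : rows = [] ∨ rows.any List.isEmpty then []
  else (rows.map (fun r => r.headD ' ')) :: zipAll (rows.map List.tail)
termination_by (rows.map List.length).sum
decreasing_by simpa using pvZipMeasure rows h

-- rotate_cw(grid) = ["".join(row) for row in zip(*grid[::-1])]
def rotA (g : List String) : List String :=
  (zipAll ((g.reverse).map String.toList)).map (fun r => String.ofList r)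

-- for _ in range(len(row) - 1): row = row.replace("O.", ".O")   ("".join of a str is the str)
def tiltRowA (s : String) : String :=
  (List.range (s.toList.length - 1)).foldl (fun t _ => PySem.Str.replace t "O." ".O") s

-- tilt_platform: grid[x] updated row by row, independently
def tiltA (g : List String) : List String := g.map tiltRowA

-- spin_cycle: 4 × (rotate then tilt)
def spinA (g : List String) : List String :=
  (List.range 4).foldl (fun h _ => tiltA (rotA h)) g

-- get_load: sum(len(grid)-y for y in range(len(grid)) for x in range(len(grid[0])) if grid[y][x]=="O")
-- grid[0] / grid[y][x]: indices are in range at every call site (grid is rectangular there); getD/headD stand for the in-range subscripts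
def getLoadA (g : List String) : Int :=
  ((List.range g.length).flatMap (fun y =>
    ((List.range (g.headD "").toList.length).filter
      (fun x => ((g.getD y "").toList.getD x ' ') = 'O')).map
        (fun _ => (g.length : Int) - Int.ofNat y))).sum

-- the while loop of part2 (found-flag, jump over whole cycles)
def loopA (grid : List String) (known : PySem.Dict (List String) Int)
    (steps : Int) (found : Bool) : Int :=
  if h : steps < pvLimit then
    let steps1 := steps + 1
    let grid1 := spinA grid
    if known.contains grid1 && !found then
      let cycle := steps1 - ((known.get? grid1).getD 0)
      let steps2 := steps1 + (PySem.Int.floordiv (pvLimit - steps1) cycle) * cycle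
      loopA grid1 (known.insert grid1 steps2) steps2 true
    else
      loopA grid1 (known.insert grid1 steps1) steps1 found
  else getLoadA grid
termination_by (pvLimit - steps).toNat
decreasing_by
  · have hq : (0:Int) ≤ pvLimit - (steps+1) := by omega
    have hnn : 0 ≤ (PySem.Int.floordiv (pvLimit - (steps+1)) (steps + 1 - ((known.get? (spinA grid)).getD 0))) * (steps + 1 - ((known.get? (spinA grid)).getD 0)) := by
      rcases lt_trichotomy (steps + 1 - ((known.get? (spinA grid)).getD 0)) 0 with hlt | heq | hgt
      · exact Int.mul_nonneg_of_nonpos_of_nonpos (Int.fdiv_nonpos_of_nonneg_of_nonpos hq hlt.le) hlt.le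
      · rw [heq]; simp [PySem.Int.floordiv]
      · exact mul_nonneg (Int.fdiv_nonneg hq hgt.le) hgt.le
    simp only [PySem.Int.floordiv] at hnn ⊢
    omega
  · omega

def part2 (data : List String) : Int :=
  loopA data PySem.Dict.empty 0 false

-- ===== PORT B =====
-- one linear pass: within each maximal run of '.'/'O' cells the dots come first, the rocks last
def packGo : List Char → List Char → Nat → Nat → List Char
  | [], acc, d, o => acc ++ (List.replicate d '.' ++ List.replicate o 'O')
  | c :: t, acc, d, o =>
    if c = '.' then packGo t acc (d + 1) o
    else if c = 'O' then packGo t acc d (o + 1)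
    else packGo t (acc ++ (List.replicate d '.' ++ List.replicate o 'O' ++ [c])) 0 0

def packRow (s : String) : String := String.ofList (packGo s.toList [] 0 0)

-- m = min(map(len, grid), default=0)
def minLenB (g : List String) : Int := PySem.List.minD (g.map PySem.Str.len) (fun x => x) 0

-- ''.join(row[j] for row in reversed(grid)); row[j] is in range for j < m
def rotRowB (g : List String) (j : Nat) : String :=
  String.ofList ((g.reverse).map (fun r => r.toList.getD j ' '))

-- grid = [_pack_row(''.join(row[j] for row in reversed(grid))) for j in range(m)]
def spinStepB (g : List String) : List String :=
  (List.range (minLenB g).toNat).map (fun j => packRow (rotRowB g j))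

def spinB (g : List String) : List String :=
  (List.range 4).foldl (fun h _ => spinStepB h) g

-- sum((n - y) * grid[y].count('O') for y in range(n))
def loadB (g : List String) : Int :=
  ((List.range g.length).map
    (fun y => ((g.length : Int) - Int.ofNat y) * (PySem.Str.count (g.getD y "") "O" : Int))).sum

def loopB (grid : List String) (seen : PySem.Dict (List String) Int) (steps : Int) : Int :=
  if h : steps < pvLimit then
    let steps1 := steps + 1
    let grid1 := spinB grid
    if seen.contains grid1 then
      let cycle := steps1 - ((seen.get? grid1).getD 0)
      let rem := PySem.Int.mod (pvLimit - steps1) cycle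
      loadB ((List.range rem.toNat).foldl (fun g _ => spinB g) grid1)
    else loopB grid1 (seen.insert grid1 steps1) steps1
  else loadB grid
termination_by (pvLimit - steps).toNat
decreasing_by omega

def part2_alt (data : List String) : Int :=
  loopB data PySem.Dict.empty 0

-- ===== PRECONDITION & SPEC =====
def Spec_part2 (data : List String) (out : Int) : Prop := out = part2_alt data
instance (data : List String) (out : Int) : Decidable (Spec_part2 data out) := by unfold Spec_part2; infer_instance

-- ===== CLAIM (what is proved, stated in full; the proofs are below) =====
def Claim_equal_part2 : Prop := ∀ (data : List String), Dom_part2 data → Spec_part2 data (part2 data)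

-- ===== LEMMAS AND PROOFS =====

def repl : List Char → List Char
  | [] => []
  | [c] => [c]
  | a :: b :: t => if a = 'O' ∧ b = '.' then '.' :: 'O' :: repl t else a :: repl (b :: t)

theorem replace_go_eq : ∀ (fuel : Nat) (l acc : List Char), l.length ≤ fuel →
    PySem.Chars.replace.go ['O','.'] ['.','O'] fuel l acc = acc.reverse ++ repl l := by
  intro fuel
  induction fuel with
  | zero =>
    intro l acc h
    have hl : l = [] := List.length_eq_zero_iff.mp (Nat.le_zero.mp h)
    subst hl
    rw [PySem.Chars.replace.go]
    simp [repl]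
  | succ fuel ih =>
    intro l acc h
    match l with
    | [] =>
      rw [PySem.Chars.replace.go]
      simp [repl]
      omega
    | [c] =>
      rw [PySem.Chars.replace.go]
      have hpre : (['O','.'].isPrefixOf [c]) = false := by simp [List.isPrefixOf]
      rw [hpre]
      simp only [Bool.false_eq_true, if_false]
      rw [ih [] (c::acc) (by simp)]
      simp [repl]
    | a :: b :: t =>
      rw [PySem.Chars.replace.go]
      have hpre : (['O','.'].isPrefixOf (a::b::t)) = ('O' == a && '.' == b) := by
        simp [List.isPrefixOf]
      rw [hpre]
      by_cases hab : a = 'O' ∧ b = '.'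
      · obtain ⟨ha, hb⟩ := hab; subst ha hb
        simp only [beq_self_eq_true, Bool.and_self, if_true]
        show PySem.Chars.replace.go ['O','.'] ['.','O'] fuel t ('O'::'.'::acc) = _
        rw [ih t _ (by simp at h ⊢; omega)]
        simp [repl]
      · have hb : ('O' == a && '.' == b) = false := by
          rcases not_and_or.mp hab with h1 | h1 <;> simp [beq_iff_eq] <;> intro h2 <;>
            first | exact absurd h2.symm h1 | (intro h3; exact absurd h3.symm h1)
        rw [hb]
        simp only [Bool.false_eq_true, if_false]
        rw [ih (b::t) (a::acc) (by simp at h ⊢; omega)]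
        simp [repl, hab]

theorem replace_eq_repl (s : String) :
    (PySem.Str.replace s "O." ".O").toList = repl s.toList := by
  rw [PySem.Str.toList_replace]
  show PySem.Chars.replace s.toList ['O','.'] ['.','O'] = _
  rw [PySem.Chars.replace]
  simp only [List.isEmpty, Bool.false_eq_true, if_false]
  rw [replace_go_eq s.toList.length s.toList [] le_rfl]
  simp

theorem repl_length : ∀ (l : List Char), (repl l).length = l.length := by
  intro l
  induction l using repl.induct with
  | case1 => simp [repl]
  | case2 c => simp [repl]
  | case3 a b t hab ih => simp [repl, hab, ih]
  | case4 a b t hab ih => simp only [repl, if_neg hab, List.length_cons, ih]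

def insO : List Char → List Char
  | [] => ['O']
  | c :: t => if c = '.' then '.' :: insO t else 'O' :: c :: t

def pack0 : List Char → List Char
  | [] => []
  | c :: t => if c = '.' then '.' :: pack0 t else if c = 'O' then insO (pack0 t) else c :: pack0 t

theorem insO_length (l : List Char) : (insO l).length = l.length + 1 := by
  induction l with
  | nil => simp [insO]
  | cons c t ih =>
    by_cases hc : c = '.' <;> simp [insO, hc, ih]

theorem pack0_length (l : List Char) : (pack0 l).length = l.length := by
  induction l with
  | nil => simp [pack0]
  | cons c t ih =>
    by_cases hc : c = '.'
    · simp [pack0, hc, ih]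
    · by_cases ho : c = 'O' <;> simp [pack0, hc, ho, insO_length, ih]

theorem insO_iter_dot (m : Nat) (l : List Char) :
    insO^[m] ('.' :: l) = '.' :: insO^[m] l := by
  induction m generalizing l with
  | zero => simp
  | succ m ih =>
    rw [Function.iterate_succ_apply, Function.iterate_succ_apply]
    rw [show insO ('.'::l) = '.' :: insO l from by simp [insO]]
    exact ih (insO l)

theorem insO_nondot (l : List Char) (h : ∀ c, l.head? = some c → c ≠ '.') :
    insO l = 'O' :: l := by
  cases l with
  | nil => simp [insO]
  | cons c t => simp [insO, h c rfl]

theorem insO_iter_nondot (m : Nat) (l : List Char)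
    (h : ∀ c, l.head? = some c → c ≠ '.') :
    insO^[m] l = List.replicate m 'O' ++ l := by
  induction m with
  | zero => simp
  | succ m ih =>
    rw [Function.iterate_succ_apply', ih]
    rw [insO_nondot]
    · simp [List.replicate_succ]
    · intro c hc
      cases m with
      | zero => simpa using h c (by simpa using hc)
      | succ k =>
        simp [List.replicate_succ] at hc
        subst hc; decide

theorem pack0_dots (d : Nat) (l : List Char) :
    pack0 (List.replicate d '.' ++ l) = List.replicate d '.' ++ pack0 l := by
  induction d with
  | zero => simp
  | succ d ih => simp [List.replicate_succ, pack0, ih]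

theorem pack0_runO (m : Nat) (l : List Char) :
    pack0 (List.replicate m 'O' ++ l) = insO^[m] (pack0 l) := by
  induction m with
  | zero => simp
  | succ m ih =>
    simp [List.replicate_succ, pack0, ih, Function.iterate_succ_apply']

theorem repl_cons_nondot (a : Char) (t : List Char)
    (h : ∀ b, t.head? = some b → b ≠ '.') : repl (a :: t) = a :: repl t := by
  cases t with
  | nil => simp [repl]
  | cons b t' =>
    have : ¬(a = 'O' ∧ b = '.') := fun hab => h b rfl hab.2
    simp [repl, this]

theorem repl_cons_notO (a : Char) (t : List Char) (h : a ≠ 'O') :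
    repl (a :: t) = a :: repl t := by
  cases t with
  | nil => simp [repl]
  | cons b t' =>
    have : ¬(a = 'O' ∧ b = '.') := fun hab => h hab.1
    simp [repl, this]

theorem repl_append : ∀ (xs rest : List Char),
    (∀ b, rest.head? = some b → b ≠ '.') →
    repl (xs ++ rest) = repl xs ++ repl rest := by
  intro xs
  induction xs using repl.induct with
  | case1 => intro rest h; simp [repl]
  | case2 c =>
    intro rest h
    simp only [List.cons_append, List.nil_append, repl]
    rw [repl_cons_nondot c rest h]
  | case3 a b t hab ih =>
    intro rest h
    obtain ⟨ha, hb⟩ := hab; subst ha hb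
    simp only [List.cons_append]
    rw [show repl ('O'::'.'::(t ++ rest)) = '.'::'O'::repl (t ++ rest) from by simp [repl]]
    rw [show repl ('O'::'.'::t) = '.'::'O'::repl t from by simp [repl]]
    rw [ih rest h]
    simp
  | case4 a b t hab ih =>
    intro rest h
    simp only [List.cons_append]
    rw [show repl (a::b::(t ++ rest)) = a :: repl (b::(t++rest)) from by simp [repl, hab]]
    rw [show repl (a::b::t) = a :: repl (b::t) from by simp [repl, hab]]
    rw [← List.cons_append, ih rest h]
    simp

theorem repl_runO (a : Nat) : repl (List.replicate a 'O') = List.replicate a 'O' := by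
  induction a with
  | zero => simp [repl]
  | succ n ih =>
    rw [List.replicate_succ, repl_cons_nondot]
    · rw [ih]
    · intro b hb
      cases n with
      | zero => simp at hb
      | succ k => simp [List.replicate_succ] at hb; subst hb; decide

theorem repl_runO_dot (a : Nat) (t : List Char) :
    repl (List.replicate (a+1) 'O' ++ '.' :: t)
      = List.replicate a 'O' ++ '.' :: 'O' :: repl t := by
  induction a with
  | zero => simp [repl]
  | succ n ih =>
    rw [List.replicate_succ, List.cons_append]
    rw [show ∀ (z : List Char), List.replicate (n+1) 'O' ++ z = 'O' :: (List.replicate n 'O' ++ z) from fun z => by simp [List.replicate_succ]]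
    rw [show repl ('O'::'O'::(List.replicate n 'O' ++ '.'::t)) = 'O' :: repl ('O'::(List.replicate n 'O' ++ '.'::t)) from by simp [repl]]
    rw [show ('O':Char) :: (List.replicate n 'O' ++ '.'::t) = List.replicate (n+1) 'O' ++ '.'::t from by simp [List.replicate_succ]]
    rw [ih]
    simp [List.replicate_succ]

theorem repl_runO_absorb (a : Nat) (y : List Char) :
    repl (List.replicate (a+1) 'O' ++ y) = List.replicate a 'O' ++ repl ('O' :: y) := by
  induction a with
  | zero => simp
  | succ n ih =>
    rw [show List.replicate (n+1+1) 'O' ++ y = 'O' :: (List.replicate (n+1) 'O' ++ y) from by simp [List.replicate_succ]]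
    rw [show repl ('O' :: (List.replicate (n+1) 'O' ++ y)) = 'O' :: repl (List.replicate (n+1) 'O' ++ y) from by
      rw [repl_cons_nondot]
      intro b hb
      simp [List.replicate_succ] at hb
      subst hb; decide]
    rw [ih]
    simp [List.replicate_succ]

theorem repl_iter_dot (k : Nat) (l : List Char) :
    repl^[k] ('.' :: l) = '.' :: repl^[k] l := by
  induction k generalizing l with
  | zero => simp
  | succ k ih =>
    rw [Function.iterate_succ_apply, Function.iterate_succ_apply]
    rw [repl_cons_notO '.' l (by decide)]
    exact ih (repl l)

theorem repl_travel (a : Nat) : ∀ (k : Nat) (t : List Char),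
    repl^[a + 1 + k] (List.replicate (a+1) 'O' ++ '.' :: t)
      = '.' :: repl^[a + k] (List.replicate (a+1) 'O' ++ repl t) := by
  induction a with
  | zero =>
    intro k t
    rw [show 0 + 1 + k = k + 1 from by omega, Function.iterate_succ_apply]
    rw [show (List.replicate 1 'O' ++ '.' :: t) = 'O'::'.'::t from rfl]
    rw [show repl ('O'::'.'::t) = '.'::'O'::repl t from by simp [repl]]
    rw [repl_iter_dot]
    simp
  | succ a ih =>
    intro k t
    rw [show a + 1 + 1 + k = (a + 1 + k) + 1 from by omega, Function.iterate_succ_apply]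
    rw [repl_runO_dot (a+1) t]
    rw [show List.replicate (a+1) 'O' ++ '.' :: 'O' :: repl t
        = List.replicate (a+1) 'O' ++ '.' :: ('O' :: repl t) from rfl]
    rw [ih k ('O' :: repl t)]
    congr 1
    rw [← repl_runO_absorb (a+1) (repl t)]
    rw [← Function.iterate_succ_apply]
    congr 1
    omega

theorem pack0_repl : ∀ (l : List Char), pack0 (repl l) = pack0 l := by
  intro l
  induction l using repl.induct with
  | case1 => simp [repl]
  | case2 c => simp [repl]
  | case3 a b t hab ih =>
    obtain ⟨ha, hb⟩ := hab; subst ha hb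
    rw [show repl ('O'::'.'::t) = '.'::'O'::repl t from by simp [repl]]
    rw [show pack0 ('.'::'O'::repl t) = '.' :: insO (pack0 (repl t)) from by simp [pack0]]
    rw [show pack0 ('O'::'.'::t) = insO (pack0 ('.'::t)) from by simp [pack0]]
    rw [show pack0 ('.'::t) = '.' :: pack0 t from by simp [pack0]]
    rw [show insO ('.'::pack0 t) = '.' :: insO (pack0 t) from by simp [insO]]
    rw [ih]
  | case4 a b t hab ih =>
    rw [show repl (a::b::t) = a :: repl (b::t) from by simp [repl, hab]]
    by_cases hd : a = '.'
    · subst hd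
      have hp : ∀ (z : List Char), pack0 ('.'::z) = '.' :: pack0 z := fun z => by simp [pack0]
      rw [hp, hp, ih]
    · by_cases ho : a = 'O'
      · subst ho
        have : ∀ (z : List Char), pack0 ('O'::z) = insO (pack0 z) := by intro z; simp [pack0]
        rw [this, this, ih]
      · have : ∀ (z : List Char), pack0 (a::z) = a :: pack0 z := by intro z; simp [pack0, hd, ho]
        rw [this, this, ih]

theorem repl_iter_pack : ∀ (n : Nat) (w : List Char) (k : Nat),
    w.length = n → n ≤ k + 1 → repl^[k] w = pack0 w := by
  intro n
  induction n using Nat.strong_induction_on with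
  | _ n IH =>
    intro w k hw hk
    match w with
    | [] => simp [pack0, Function.iterate_fixed (show repl [] = [] from rfl)]
    | c :: t =>
      by_cases hd : c = '.'
      · subst hd
        rw [repl_iter_dot, show pack0 ('.'::t) = '.'::pack0 t from by simp [pack0]]
        have hn1 : t.length + 1 = n := by simpa using hw
        have ht : t.length = n - 1 := by omega
        rw [IH (n-1) (by omega) t k ht (by omega)]
      · by_cases ho : c = 'O'
        · subst ho
          -- split off the leading run of 'O's
          have hsplit : ∃ (m : Nat) (u : List Char), 'O'::t = List.replicate (m+1) 'O' ++ u ∧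
              (∀ b, u.head? = some b → b ≠ 'O') := by
            clear hw hk IH
            induction t with
            | nil => exact ⟨0, [], by simp, by simp⟩
            | cons d t' ih' =>
              by_cases hdO : d = 'O'
              · subst hdO
                obtain ⟨m, u, h1, h2⟩ := ih'
                exact ⟨m+1, u, by rw [show List.replicate (m+1+1) 'O' = 'O' :: List.replicate (m+1) 'O' from by simp [List.replicate_succ], List.cons_append, ← h1], h2⟩
              · exact ⟨0, d::t', by simp, fun b hb => by simp at hb; subst hb; exact hdO⟩
          obtain ⟨m, u, hsp, hu⟩ := hsplit
          rw [hsp]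
          match u, hu with
          | [], _ =>
            rw [show (List.replicate (m+1) 'O' ++ [] : List Char) = List.replicate (m+1) 'O' from by simp]
            rw [Function.iterate_fixed (repl_runO (m+1))]
            rw [show pack0 (List.replicate (m+1) 'O') = insO^[m+1] (pack0 []) from by
              simpa using pack0_runO (m+1) []]
            rw [show pack0 [] = ([] : List Char) from by simp [pack0]]
            rw [insO_iter_nondot (m+1) [] (by simp)]
            simp
          | b :: u', hu =>
            have hbO : b ≠ 'O' := hu b rfl
            by_cases hbd : b = '.'
            · subst hbd
              -- the travelling case
              have hlen : ('O'::t).length = n := hw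
              have hlen2 : (List.replicate (m+1) 'O' ++ '.'::u').length = n := by rw [← hsp]; exact hlen
              have hn : n = m + 2 + u'.length := by
                have h3 := hlen2; simp at h3; omega
              have hkm : m + 1 ≤ k := by omega
              obtain ⟨k', hk'⟩ : ∃ k', k = m + 1 + k' := ⟨k - (m+1), by omega⟩
              subst hk'
              rw [repl_travel m k' u']
              have hV : (List.replicate (m+1) 'O' ++ repl u').length = n - 1 := by
                simp [repl_length]; omega
              rw [IH (n-1) (by omega) _ (m + k') hV (by omega)]
              rw [pack0_runO, pack0_repl]
              rw [show pack0 (List.replicate (m+1) 'O' ++ '.'::u') = insO^[m+1] (pack0 ('.'::u')) from pack0_runO (m+1) ('.'::u')]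
              rw [show pack0 ('.'::u') = '.' :: pack0 u' from by simp [pack0]]
              rw [insO_iter_dot]
            · -- barrier after the run: split
              have hlen2 : (List.replicate (m+1) 'O' ++ b::u').length = n := by rw [← hsp]; exact hw
              have hn : n = m + 2 + u'.length := by
                have h3 := hlen2; simp at h3; omega
              have hrw : ∀ (j : Nat), repl^[j] (List.replicate (m+1) 'O' ++ b::u')
                  = List.replicate (m+1) 'O' ++ b :: repl^[j] u' := by
                intro j
                induction j with
                | zero => simp
                | succ j ihj =>
                  rw [Function.iterate_succ_apply', ihj]
                  rw [repl_append _ _ (fun x hx => by simp at hx; subst hx; exact hbd)]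
                  rw [repl_runO, repl_cons_notO b _ hbO]
                  rw [show repl (repl^[j] u') = repl^[j+1] u' from (Function.iterate_succ_apply' repl j u').symm]
              rw [hrw k]
              rw [show pack0 (List.replicate (m+1) 'O' ++ b::u') = insO^[m+1] (pack0 (b::u')) from pack0_runO (m+1) (b::u')]
              rw [show pack0 (b::u') = b :: pack0 u' from by simp [pack0, hbd, hbO]]
              rw [insO_iter_nondot (m+1) _ (fun x hx => by simp at hx; subst hx; exact hbd)]
              rw [IH u'.length (by omega) u' k rfl (by omega)]
        · -- barrier head (c neither '.' nor 'O')
          have h1 : ∀ j, repl^[j] (c::t) = c :: repl^[j] t := by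
            intro j
            induction j with
            | zero => simp
            | succ j ihj =>
              rw [Function.iterate_succ_apply', ihj, repl_cons_notO c _ ho,
                show repl (repl^[j] t) = repl^[j+1] t from (Function.iterate_succ_apply' repl j t).symm]
          rw [h1 k, show pack0 (c::t) = c :: pack0 t from by simp [pack0, hd, ho]]
          have hn1 : t.length + 1 = n := by simpa using hw
          rw [IH t.length (by omega) t k rfl (by omega)]

theorem pack0_dots_runO (d o : Nat) :
    pack0 (List.replicate d '.' ++ List.replicate o 'O')
      = List.replicate d '.' ++ List.replicate o 'O' := by
  rw [pack0_dots]
  rw [show pack0 (List.replicate o 'O') = insO^[o] (pack0 []) from by simpa using pack0_runO o []]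
  rw [show pack0 [] = ([] : List Char) from by simp [pack0]]
  rw [insO_iter_nondot o [] (by simp)]
  simp

theorem packGo_eq : ∀ (t acc : List Char) (d o : Nat),
    packGo t acc d o = acc ++ pack0 (List.replicate d '.' ++ List.replicate o 'O' ++ t) := by
  intro t
  induction t with
  | nil =>
    intro acc d o
    rw [packGo]
    rw [show List.replicate d '.' ++ List.replicate o 'O' ++ ([] : List Char)
        = List.replicate d '.' ++ List.replicate o 'O' from by simp]
    rw [pack0_dots_runO]
  | cons c t ih =>
    intro acc d o
    by_cases hd : c = '.'
    · subst hd
      rw [show packGo ('.'::t) acc d o = packGo t acc (d+1) o from by simp [packGo]]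
      rw [ih]
      congr 1
      simp only [List.append_assoc]
      rw [pack0_dots, pack0_dots, pack0_runO, pack0_runO]
      rw [show pack0 ('.'::t) = '.' :: pack0 t from by simp [pack0]]
      rw [insO_iter_dot]
      rw [show List.replicate (d+1) '.' = List.replicate d '.' ++ ['.'] from by rw [← List.replicate_succ']]
      simp
    · by_cases ho : c = 'O'
      · subst ho
        rw [show packGo ('O'::t) acc d o = packGo t acc d (o+1) from by simp [packGo, hd]]
        rw [ih]
        congr 1
        simp only [List.append_assoc]
        rw [pack0_dots, pack0_dots, pack0_runO, pack0_runO]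
        rw [show pack0 ('O'::t) = insO (pack0 t) from by simp [pack0]]
        rw [show insO^[o] (insO (pack0 t)) = insO^[o+1] (pack0 t) from (Function.iterate_succ_apply insO o (pack0 t)).symm]
      · rw [show packGo (c::t) acc d o = packGo t (acc ++ (List.replicate d '.' ++ List.replicate o 'O' ++ [c])) 0 0 from by simp [packGo, hd, ho]]
        rw [ih]
        rw [show List.replicate 0 '.' ++ List.replicate 0 'O' ++ t = t from by simp]
        simp only [List.append_assoc]
        rw [pack0_dots, pack0_runO]
        rw [show pack0 (c::t) = c :: pack0 t from by simp [pack0, hd, ho]]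
        rw [insO_iter_nondot o _ (fun x hx => by simp at hx; subst hx; exact hd)]
        simp

theorem fold_replace_toList (k : Nat) (s : String) :
    ((List.range k).foldl (fun t _ => PySem.Str.replace t "O." ".O") s).toList
      = repl^[k] s.toList := by
  induction k generalizing s with
  | zero => simp
  | succ k ih =>
    rw [List.range_succ, List.foldl_append]
    simp only [List.foldl_cons, List.foldl_nil]
    rw [replace_eq_repl, ih s]
    exact (Function.iterate_succ_apply' repl k s.toList).symm

theorem tiltRow_eq (s : String) : tiltRowA s = packRow s := by
  rw [← String.toList_inj]
  rw [show (packRow s).toList = packGo s.toList [] 0 0 from String.toList_ofList]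
  rw [packGo_eq]
  rw [show tiltRowA s = (List.range (s.toList.length - 1)).foldl (fun t _ => PySem.Str.replace t "O." ".O") s from rfl]
  rw [fold_replace_toList]
  rw [repl_iter_pack s.toList.length s.toList (s.toList.length - 1) rfl (by omega)]
  simp

/- ## rotation: zip(*grid[::-1]) = index form -/
def natMin (l : List Nat) : Nat := (l.min?).getD 0

theorem natMin_le (l : List Nat) : ∀ x ∈ l, natMin l ≤ x := by
  intro x hx
  cases h : l.min? with
  | none =>
    rw [List.min?_eq_none_iff] at h
    subst h; simp at hx
  | some a =>
    have := (List.min?_eq_some_iff.mp h).2 x hx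
    simpa [natMin, h] using this

theorem natMin_mem (l : List Nat) (h : l ≠ []) : natMin l ∈ l := by
  cases hm : l.min? with
  | none => rw [List.min?_eq_none_iff] at hm; exact absurd hm h
  | some a => simpa [natMin, hm] using (List.min?_eq_some_iff.mp hm).1

theorem natMin_map_pred (l : List Nat) :
    natMin (l.map (fun x => x - 1)) = natMin l - 1 := by
  cases hm : l.min? with
  | none =>
    rw [List.min?_eq_none_iff] at hm; subst hm; simp [natMin]
  | some a =>
    obtain ⟨hmem, hle⟩ := List.min?_eq_some_iff.mp hm
    have : (l.map (fun x => x - 1)).min? = some (a - 1) := by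
      rw [List.min?_eq_some_iff]
      constructor
      · exact List.mem_map.mpr ⟨a, hmem, rfl⟩
      · intro b hb
        obtain ⟨x, hx, hbx⟩ := List.mem_map.mp hb
        subst hbx
        exact Nat.sub_le_sub_right (hle x hx) 1
    simp [natMin, this, hm]

theorem natMin_reverse (l : List Nat) : natMin l.reverse = natMin l := by
  cases hm : l.min? with
  | none => rw [List.min?_eq_none_iff] at hm; subst hm; simp
  | some a =>
    obtain ⟨hmem, hle⟩ := List.min?_eq_some_iff.mp hm
    have : l.reverse.min? = some a := by
      rw [List.min?_eq_some_iff]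
      exact ⟨List.mem_reverse.mpr hmem, fun b hb => hle b (List.mem_reverse.mp hb)⟩
    simp [natMin, this, hm]

theorem zipAll_eq (rows : List (List Char)) :
    zipAll rows = (List.range (natMin (rows.map List.length))).map
      (fun j => rows.map (fun r => r.getD j ' ')) := by
  induction rows using zipAll.induct with
  | case1 rows h =>
    rw [zipAll, dif_pos h]
    rcases h with h | h
    · subst h; simp [natMin]
    · obtain ⟨r, hr, hre⟩ := List.any_eq_true.mp h
      have h0 : (0 : Nat) ∈ rows.map List.length := by
        refine List.mem_map.mpr ⟨r, hr, ?_⟩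
        cases r
        · rfl
        · simp [List.isEmpty] at hre
      have := natMin_le _ 0 h0
      have hM : natMin (rows.map List.length) = 0 := Nat.le_zero.mp this
      rw [hM]
      simp
  | case2 rows h ih =>
    simp only [List.map_subtype, List.unattach_attach] at ih
    rw [zipAll, dif_neg h]
    have hne : rows ≠ [] := fun he => h (Or.inl he)
    have hnonempty : ∀ r ∈ rows, r ≠ [] := by
      intro r hr hre
      exact h (Or.inr (List.any_eq_true.mpr ⟨r, hr, by subst hre; rfl⟩))
    have hpos : 0 < natMin (rows.map List.length) := by
      have hmm := natMin_mem (rows.map List.length) (by simpa using hne)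
      obtain ⟨r, hr, hlen⟩ := List.mem_map.mp hmm
      rw [← hlen]
      exact List.length_pos_iff.mpr (hnonempty r hr)
    set M := natMin (rows.map List.length) with hM
    have hM1 : (rows.map List.tail).map List.length = (rows.map List.length).map (fun x => x - 1) := by
      simp only [List.map_map]
      apply List.map_congr_left
      intro r _
      simp
    have hM' : natMin ((rows.map List.tail).map List.length) = M - 1 := by
      rw [hM1, natMin_map_pred]
    rw [ih, hM']
    rw [show M = (M - 1) + 1 from by omega, List.range_succ_eq_map]
    simp only [List.map_cons, List.map_map]
    congr 1
    · apply List.map_congr_left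
      intro r _
      cases r <;> rfl
    · apply List.map_congr_left
      intro j _
      simp only [Function.comp]
      apply List.map_congr_left
      intro r hr
      cases r with
      | nil => exact absurd rfl (hnonempty _ hr)
      | cons a t => rfl

theorem pysem_min?_cons (a : Int) (xs : List Int) :
    PySem.List.min? (a :: xs) (fun x : Int => x) = some (xs.foldl min a) := by
  induction xs generalizing a with
  | nil => rfl
  | cons x t ih =>
    have h1 : PySem.List.min? (a::x::t) (fun x : Int => x)
        = PySem.List.min? ((min a x)::t) (fun x : Int => x) := by
      show List.foldl _ (if x < a then some x else some a) t
          = List.foldl _ (some (min a x)) t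
      congr 1
      rw [min_def]
      split_ifs <;> simp_all <;> omega
    rw [h1, ih]
    simp

theorem foldl_min_cast (xs : List Nat) (a : Nat) :
    (xs.map Int.ofNat).foldl min (Int.ofNat a) = Int.ofNat (xs.foldl min a) := by
  induction xs generalizing a with
  | nil => simp
  | cons x t ih =>
    simp only [List.map_cons, List.foldl_cons]
    rw [show min (Int.ofNat a) (Int.ofNat x) = Int.ofNat (min a x) from by
      simp only [min_def, Int.ofNat_eq_natCast]
      split_ifs <;> omega]
    exact ih (min a x)

theorem minLenB_toNat (g : List String) :
    (minLenB g).toNat = natMin (g.map (fun s => s.toList.length)) := by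
  cases g with
  | nil => rfl
  | cons s t =>
    unfold minLenB PySem.List.minD
    simp only [List.map_cons]
    rw [show PySem.Str.len s = Int.ofNat s.toList.length from rfl]
    rw [show t.map PySem.Str.len = (t.map (fun s => s.toList.length)).map Int.ofNat from by
      simp only [List.map_map]; rfl]
    rw [pysem_min?_cons, foldl_min_cast]
    simp only [Option.getD_some]
    rw [show (Int.ofNat ((t.map (fun s => s.toList.length)).foldl min s.toList.length)).toNat
        = (t.map (fun s => s.toList.length)).foldl min s.toList.length from rfl]
    rw [natMin, List.min?_cons]
    cases hm : (t.map (fun s => s.toList.length)).min? with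
    | none =>
      have hm' := List.min?_eq_none_iff.mp hm
      rw [hm']
      simp only [List.foldl_nil, Option.elim_none, Option.getD_some]
    | some b =>
      rw [List.foldl_min, hm]
      simp only [Option.elim_some, Option.getD_some]

/- ## per-step and per-spin equality -/
theorem step_eq (g : List String) : tiltA (rotA g) = spinStepB g := by
  unfold tiltA rotA spinStepB
  rw [zipAll_eq]
  have hM : natMin (((g.reverse).map String.toList).map List.length) = (minLenB g).toNat := by
    rw [minLenB_toNat]
    rw [show ((g.reverse).map String.toList).map List.length
        = (g.map (fun s => s.toList.length)).reverse from by
      simp only [List.map_reverse, List.map_map]; rfl]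
    exact natMin_reverse _
  rw [hM]
  simp only [List.map_map]
  apply List.map_congr_left
  intro k _
  simp only [Function.comp]
  rw [tiltRow_eq]
  unfold packRow rotRowB
  congr 2

theorem spin_eq : spinA = spinB := by
  funext g
  unfold spinA spinB
  rw [show (fun (h : List String) (_ : Nat) => tiltA (rotA h))
      = (fun (h : List String) (_ : Nat) => spinStepB h) from
    funext fun h => funext fun _ => step_eq h]

/- ## load equality on rectangular grids -/
def Rect (g : List String) : Prop :=
  ∀ s ∈ g, s.toList.length = (g.headD "").toList.length

theorem count_go_eq : ∀ (fuel : Nat) (l acc : List Char) (n : Nat), l.length ≤ fuel →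
    PySem.Chars.count.go ['O'] fuel l n = n + l.count 'O' := by
  intro fuel
  induction fuel with
  | zero =>
    intro l acc n h
    have hl : l = [] := List.length_eq_zero_iff.mp (Nat.le_zero.mp h)
    subst hl
    rw [PySem.Chars.count.go]
    simp
  | succ fuel ih =>
    intro l acc n h
    match l with
    | [] =>
      rw [PySem.Chars.count.go]
      simp
      omega
    | c :: t =>
      rw [PySem.Chars.count.go]
      have hpre : (['O'].isPrefixOf (c::t)) = ('O' == c) := by
        simp [List.isPrefixOf]
      rw [hpre]
      by_cases hc : c = 'O'
      · subst hc
        simp only [beq_self_eq_true, if_true]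
        rw [show List.drop (['O'].length) ('O'::t) = t from rfl]
        rw [ih t acc (n+1) (by simp at h ⊢; omega)]
        simp [List.count_cons]
        omega
      · have : ('O' == c) = false := by simp [beq_iff_eq]; exact fun hh => hc hh.symm
        rw [this]
        simp only [Bool.false_eq_true, if_false]
        rw [ih t acc n (by simp at h ⊢; omega)]
        simp [List.count_cons, hc]

theorem count_single_eq (l : List Char) : PySem.Chars.count l ['O'] = l.count 'O' := by
  rw [PySem.Chars.count]
  simp only [List.isEmpty, Bool.false_eq_true, if_false]
  rw [count_go_eq l.length l [] 0 le_rfl]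
  simp

theorem map_getD_range (l : List Char) :
    (List.range l.length).map (fun i => l.getD i ' ') = l := by
  apply List.ext_getElem
  · simp
  · intro i h1 h2
    simp only [List.getElem_map, List.getElem_range]
    rw [List.getD_eq_getElem?_getD, List.getElem?_eq_getElem (by simpa using h2)]
    rfl

theorem count_range_getD (l : List Char) :
    ((List.range l.length).filter (fun x => l.getD x ' ' = 'O')).length = l.count 'O' := by
  rw [← List.countP_eq_length_filter]
  conv_rhs => rw [← map_getD_range l]
  rw [List.count_eq_countP, List.countP_map]
  apply List.countP_congr
  intro x _
  simp [Function.comp, beq_iff_eq]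

theorem sum_flatMap_int {α : Type} (f : α → List Int) (r : List α) :
    (r.flatMap f).sum = (r.map (fun y => (f y).sum)).sum := by
  induction r with
  | nil => simp
  | cons x t ih => simp [List.flatMap_cons, ih]

theorem load_eq (g : List String) (h : Rect g) : getLoadA g = loadB g := by
  unfold getLoadA loadB
  rw [sum_flatMap_int]
  congr 1
  apply List.map_congr_left
  intro y hy
  rw [PySem.List.sum_map_const_int]
  have hyl : y < g.length := List.mem_range.mp hy
  have hrowmem : g.getD y "" ∈ g := by
    rw [List.getD_eq_getElem?_getD, List.getElem?_eq_getElem hyl]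
    exact List.getElem_mem hyl
  have hrow : (g.getD y "").toList.length = (g.headD "").toList.length := h _ hrowmem
  rw [← hrow]
  rw [count_range_getD]
  rw [show PySem.Str.count (g.getD y "") "O" = PySem.Chars.count (g.getD y "").toList ['O'] from by
    rw [PySem.Str.count_eq]; rfl]
  rw [count_single_eq]
  ring

theorem packRow_length (s : String) : (packRow s).toList.length = s.toList.length := by
  unfold packRow
  rw [String.toList_ofList, packGo_eq]
  simp [pack0_length]

theorem rect_spinStepB (g : List String) : Rect (spinStepB g) := by
  have hlen : ∀ j, (packRow (rotRowB g j)).toList.length = g.length := by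
    intro j
    rw [packRow_length]
    unfold rotRowB
    rw [String.toList_ofList]
    simp
  intro s hs
  unfold spinStepB at hs ⊢
  obtain ⟨j, hj, rfl⟩ := List.mem_map.mp hs
  rw [hlen j]
  have hm : (minLenB g).toNat ≠ 0 := by
    intro h0
    rw [h0] at hj
    simp at hj
  rw [show List.range (minLenB g).toNat = 0 :: (List.range ((minLenB g).toNat - 1)).map (· + 1) from by
    rw [← List.range_succ_eq_map]
    congr 1
    omega]
  simp only [List.map_cons, List.headD_cons]
  rw [hlen 0]

theorem rect_spinB (g : List String) : Rect (spinB g) := by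
  rw [show spinB g = spinStepB (spinStepB (spinStepB (spinStepB g))) from by
    unfold spinB
    rw [show List.range 4 = [0,1,2,3] from by decide]
    simp only [List.foldl_cons, List.foldl_nil]]
  exact rect_spinStepB _

theorem rect_spin_iter (r : Nat) (g : List String) : Rect (spinB^[r] (spinB g)) := by
  cases r with
  | zero => exact rect_spinB g
  | succ r =>
    rw [Function.iterate_succ_apply']
    exact rect_spinB _

/- ## loop equality -/
theorem foldl_range_iterate {α : Type} (F : α → α) (k : Nat) (a : α) :
    (List.range k).foldl (fun x _ => F x) a = F^[k] a := by
  induction k with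
  | zero => simp
  | succ k ih =>
    rw [List.range_succ, List.foldl_append, ih]
    simp only [List.foldl_cons, List.foldl_nil]
    exact (Function.iterate_succ_apply' F k a).symm

theorem loopA_found : ∀ (fuel : Nat) (grid : List String)
    (known : PySem.Dict (List String) Int) (steps : Int),
    (pvLimit - steps).toNat = fuel →
    loopA grid known steps true = getLoadA (spinA^[(pvLimit - steps).toNat] grid) := by
  intro fuel
  induction fuel with
  | zero =>
    intro grid known steps hf
    have hs : ¬(steps < pvLimit) := by omega
    rw [loopA, dif_neg hs, hf]
    simp
  | succ fuel ih =>
    intro grid known steps hf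
    have hs : steps < pvLimit := by omega
    rw [loopA, dif_pos hs]
    simp only [Bool.not_true, Bool.and_false, Bool.false_eq_true, if_false]
    rw [ih (spinA grid) _ (steps + 1) (by omega)]
    rw [hf, show (pvLimit - (steps + 1)).toNat = fuel from by omega]
    rw [← Function.iterate_succ_apply]

theorem loop_eq : ∀ (fuel : Nat) (steps : Int) (grid : List String)
    (d : PySem.Dict (List String) Int),
    (pvLimit - steps).toNat = fuel → steps < pvLimit →
    loopA grid d steps false = loopB grid d steps := by
  intro fuel
  induction fuel with
  | zero => intro steps grid d hf hs; omega
  | succ fuel ih =>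
    intro steps grid d hf hs
    rw [loopA, dif_pos hs, loopB, dif_pos hs]
    simp only [Bool.not_false, Bool.and_true]
    rw [show spinA grid = spinB grid from congrFun spin_eq grid]
    cases hc : d.contains (spinB grid) with
    | true =>
      simp only [if_true]
      rw [loopA_found (pvLimit - (steps + 1 + PySem.Int.floordiv (pvLimit - (steps + 1)) (steps + 1 - (d.get? (spinB grid)).getD 0) * (steps + 1 - (d.get? (spinB grid)).getD 0))).toNat
        (spinB grid) _ _ rfl]
      rw [foldl_range_iterate]
      rw [show spinA = spinB from spin_eq]
      have harith : pvLimit - (steps + 1 + PySem.Int.floordiv (pvLimit - (steps + 1)) (steps + 1 - (d.get? (spinB grid)).getD 0) * (steps + 1 - (d.get? (spinB grid)).getD 0))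
          = PySem.Int.mod (pvLimit - (steps + 1)) (steps + 1 - (d.get? (spinB grid)).getD 0) := by
        have := PySem.Int.floordiv_mul_add_mod (pvLimit - (steps + 1)) (steps + 1 - (d.get? (spinB grid)).getD 0)
        omega
      rw [harith]
      exact (load_eq _ (rect_spin_iter _ _)).symm ▸ rfl
    | false =>
      simp only [Bool.false_eq_true, if_false]
      by_cases hs1 : steps + 1 < pvLimit
      · exact ih (steps + 1) (spinB grid) (d.insert (spinB grid) (steps + 1)) (by omega) hs1
      · rw [loopA, dif_neg hs1, loopB, dif_neg hs1]
        exact load_eq _ (rect_spinB grid)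

-- ===== VERDICT (by name: the statement is the Claim_ definition above) =====
theorem part2_spec : Claim_equal_part2 := by
  intro data _
  unfold Spec_part2 part2 part2_alt
  exact loop_eq (pvLimit - 0).toNat 0 data PySem.Dict.empty rfl (by unfold pvLimit; omega)
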